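-- pv_equiv track=rewrite | github.com/das-developers/das2py-server | das2server/webutil/page.py | _parseCatRows
-- ===== SOURCE A (Python) =====
-- def _unquote(sVal):
-- 	if (len(sVal) > 0) and (sVal[0] == '"') and (sVal[-1] == '"'):
-- 		sVal = sVal[1:-1]
-- 	return sVal.replace('""','"')
--
-- def _parseCatRows(lRows):
-- 	"""Handle CSV escapes etc. to parse a row of csv data.  if it's not a
-- 	catalog item, ignore it.  This is the tightest CSV parser I've seen,
-- 	should prob post it somewhere for closer inspection.
-- 	"""
-- 	llOut = []
--
-- 	for sRow in lRows:
-- 		lRow = []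
-- 		bInQuote = False
-- 		iBeg = 0
-- 		iEnd = 0
-- 		nLen = len(sRow)
-- 		while(iEnd < nLen):
--
-- 			if (sRow[iEnd] == ',') and (not bInQuote):
-- 				lRow.append( _unquote(sRow[iBeg:iEnd]) )
-- 				iBeg = iEnd + 1
--
-- 			elif sRow[iEnd] == '"':
-- 				bInQuote = not bInQuote
--
-- 			iEnd += 1
--
-- 		# Handle last item
-- 		lRow.append(_unquote(sRow[iBeg:iEnd]))
--
-- 		# Ignore stuff I don't care about
-- 		if (len(lRow) > 1) and (len(lRow[0]) > 0) and (lRow[1] in ('Catalog','SourceSet')):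
-- 			llOut.append(lRow)
--
-- 	return llOut
-- ===== SOURCE B (Python) =====
-- def _unquote(sVal):
-- 	if (len(sVal) > 0) and (sVal[0] == '"') and (sVal[-1] == '"'):
-- 		sVal = sVal[1:-1]
-- 	return sVal.replace('""','"')
--
-- def _splitRow(sRow):
-- 	"""Split on every comma first, then merge pieces back while the running
-- 	double-quote count is odd; a field closes whenever the count is even."""
-- 	lRow = []
-- 	buf = []
-- 	nQ = 0
-- 	for piece in sRow.split(','):
-- 		buf.append(piece)
-- 		nQ += piece.count('"')
-- 		if nQ % 2 == 0:
-- 			lRow.append(_unquote(','.join(buf)))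
-- 			buf = []
-- 	if buf:
-- 		lRow.append(_unquote(','.join(buf)))
-- 	return lRow
--
-- def _parseCatRows(lRows):
-- 	lParsed = [_splitRow(sRow) for sRow in lRows]
-- 	return [lRow for lRow in lParsed
-- 	        if len(lRow) > 1 and len(lRow[0]) > 0 and lRow[1] in ('Catalog','SourceSet')]
-- ===== Notes on version B (the rewrite author's own statement) =====
-- stated objective: alternative
-- what changed: The char-by-char index scan with slice extraction is replaced by a tokenize-then-reassemble decomposition: each row is split on ',' and pieces are merged back by running quote-parity, and the catalog filter becomes a comprehension over pre-parsed rows.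
import Mathlib
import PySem

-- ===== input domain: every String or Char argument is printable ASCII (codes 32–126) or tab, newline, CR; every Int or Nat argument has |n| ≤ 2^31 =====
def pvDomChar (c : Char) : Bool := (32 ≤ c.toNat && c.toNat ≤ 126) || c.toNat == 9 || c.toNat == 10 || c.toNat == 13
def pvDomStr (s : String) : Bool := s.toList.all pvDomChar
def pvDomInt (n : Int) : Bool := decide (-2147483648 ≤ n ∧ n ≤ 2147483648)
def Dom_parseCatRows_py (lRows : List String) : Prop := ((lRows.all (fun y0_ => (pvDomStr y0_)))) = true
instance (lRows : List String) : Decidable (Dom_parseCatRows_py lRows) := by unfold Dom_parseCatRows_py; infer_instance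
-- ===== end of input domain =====

-- B replaces A's char-by-char index scan with split-on-comma plus quote-parity reassembly; same cost, different decomposition.

-- ===== PORT A =====
-- _unquote, shared verbatim by A and B (B's Python reuses it unchanged)
def unquote_py (s : List Char) : List Char :=
  let s1 := if 0 < s.length ∧ PySem.List.pyGet? s 0 = some '"' ∧ PySem.List.pyGet? s (-1) = some '"'
            then PySem.List.slice s (some 1) (some (-1)) else s
  PySem.Chars.replace s1 ['"', '"'] ['"']

-- the while loop of A: state (lRow, bInQuote, iBeg, iEnd), reading sRow[iEnd]
def aWhile (s : List Char) (lRow : List (List Char)) (q : Bool) (iBeg iEnd : Nat) :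
    List (List Char) :=
  if h : iEnd < s.length then
    if s[iEnd] = ',' ∧ q = false then
      aWhile s (lRow ++ [unquote_py (PySem.List.slice s (some (iBeg : Int)) (some (iEnd : Int)))])
        q (iEnd + 1) (iEnd + 1)
    else if s[iEnd] = '"' then
      aWhile s lRow (!q) iBeg (iEnd + 1)
    else
      aWhile s lRow q iBeg (iEnd + 1)
  else
    lRow ++ [unquote_py (PySem.List.slice s (some (iBeg : Int)) (some (iEnd : Int)))]
termination_by s.length - iEnd

def parseCatRows_py (lRows : List String) : List (List String) :=
  lRows.foldl (fun llOut sRow =>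
    let lRow := aWhile sRow.toList [] false 0 0
    if 1 < lRow.length ∧ 0 < (PySem.List.pyGetD lRow 0 []).length ∧
        (PySem.List.pyGetD lRow 1 [] = "Catalog".toList ∨
         PySem.List.pyGetD lRow 1 [] = "SourceSet".toList) then
      llOut ++ [lRow.map String.ofList]
    else llOut) []

-- ===== PORT B =====
-- one step of B's merge loop: state (lRow, buf, nQ)
def bStep (st : List (List Char) × List (List Char) × Nat) (piece : List Char) :
    List (List Char) × List (List Char) × Nat :=
  let buf := st.2.1 ++ [piece]
  let nQ := st.2.2 + PySem.Chars.count piece ['"']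
  if nQ % 2 = 0 then (st.1 ++ [unquote_py (PySem.Chars.join [','] buf)], [], nQ)
  else (st.1, buf, nQ)

def bRow (s : List Char) : List (List Char) :=
  let st := (PySem.Chars.splitOn s [',']).foldl bStep ([], [], 0)
  if st.2.1 = [] then st.1 else st.1 ++ [unquote_py (PySem.Chars.join [','] st.2.1)]

def parseCatRows_py_alt (lRows : List String) : List (List String) :=
  (lRows.map (fun sRow => (bRow sRow.toList).map String.ofList)).filter (fun lRow =>
    decide (1 < lRow.length ∧ 0 < (PySem.Str.len (PySem.List.pyGetD lRow 0 "")) ∧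
      (PySem.List.pyGetD lRow 1 "" = "Catalog" ∨ PySem.List.pyGetD lRow 1 "" = "SourceSet")))

-- ===== PRECONDITION & SPEC =====
def Spec_parseCatRows_py (lRows : List String) (out : List (List String)) : Prop := out = parseCatRows_py_alt lRows
instance (lRows : List String) (out : List (List String)) : Decidable (Spec_parseCatRows_py lRows out) := by unfold Spec_parseCatRows_py; infer_instance

-- ===== CLAIM (what is proved, stated in full; the proofs are below) =====
def Claim_equal_parseCatRows_py : Prop := ∀ (lRows : List String), Dom_parseCatRows_py lRows → Spec_parseCatRows_py lRows (parseCatRows_py lRows)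

-- ===== LEMMAS AND PROOFS =====

-- reference field splitter: acc = current field, q = inside quotes
def goFields : List Char → List Char → Bool → List (List Char)
  | [], acc, _ => [acc]
  | c :: rest, acc, q =>
    if c = ',' ∧ q = false then acc :: goFields rest [] false
    else goFields rest (acc ++ [c]) (if c = '"' then !q else q)

-- recursive form of str.split(',')
def mySplitAux : List Char → List Char → List (List Char)
  | [], cur => [cur.reverse]
  | c :: rest, cur => if c = ',' then cur.reverse :: mySplitAux rest [] else mySplitAux rest (c :: cur)

-- joinC = ','.join
def joinC : List (List Char) → List Char
  | [] => []
  | [p] => p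
  | p :: ps => p ++ ',' :: joinC ps

theorem splitOn_go_eq :
    ∀ (fuel : Nat) (l cur : List Char) (acc : List (List Char)), l.length < fuel →
      PySem.Chars.splitOn.go [','] fuel l cur acc = acc.reverse ++ mySplitAux l cur := by
  intro fuel
  induction fuel with
  | zero => intro l cur acc h; omega
  | succ n ih =>
    intro l cur acc h
    cases l with
    | nil => simp [PySem.Chars.splitOn.go, mySplitAux]
    | cons c rest =>
      by_cases hc : c = ','
      · subst hc
        have : ([','] : List Char).isPrefixOf (',' :: rest) = true := by
          simp [List.isPrefixOf]
        rw [PySem.Chars.splitOn.go]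
        rw [if_pos this]
        simp only [List.length_singleton, List.drop_succ_cons, List.drop_zero]
        rw [ih rest [] ((cur.reverse) :: acc) (by simpa using Nat.lt_of_succ_lt_succ h)]
        simp [mySplitAux]
      · have : ([','] : List Char).isPrefixOf (c :: rest) = false := by
          simp [List.isPrefixOf]
          exact fun h => absurd h.symm hc
        rw [PySem.Chars.splitOn.go]
        simp only [this]
        rw [ih rest (c :: cur) acc (by simpa using Nat.lt_of_succ_lt_succ h)]
        simp only [mySplitAux, if_neg hc, Bool.false_eq_true, if_false]

theorem splitOn_eq (s : List Char) : PySem.Chars.splitOn s [','] = mySplitAux s [] := by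
  have := splitOn_go_eq (s.length + 1) s [] [] (by omega)
  simpa [PySem.Chars.splitOn] using this

theorem count_go_eq : ∀ (fuel : Nat) (l : List Char) (acc : Nat), l.length ≤ fuel →
    PySem.Chars.count.go ['"'] fuel l acc = acc + l.count '"' := by
  intro fuel
  induction fuel with
  | zero =>
    intro l acc h
    have : l = [] := List.eq_nil_of_length_eq_zero (by omega)
    subst this
    simp [PySem.Chars.count.go]
  | succ n ih =>
    intro l acc h
    cases l with
    | nil => simp [PySem.Chars.count.go]
    | cons c rest =>
      by_cases hc : c = '"'
      · subst hc
        have hp : (['"'] : List Char).isPrefixOf ('"' :: rest) = true := by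
          simp [List.isPrefixOf]
        rw [PySem.Chars.count.go, if_pos hp]
        simp only [List.length_singleton, List.drop_succ_cons, List.drop_zero]
        rw [ih rest (acc + 1) (by simpa using Nat.le_of_succ_le_succ h)]
        rw [List.count_cons_self]
        omega
      · have hp : (['"'] : List Char).isPrefixOf (c :: rest) = false := by
          simp [List.isPrefixOf]
          exact fun h => absurd h.symm hc
        rw [PySem.Chars.count.go, hp]
        simp only [Bool.false_eq_true, if_false]
        rw [ih rest acc (by simpa using Nat.le_of_succ_le_succ h),
          List.count_cons_of_ne (a := '\"') (b := c) (fun h => hc h)]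

theorem count_quote_eq (p : List Char) : PySem.Chars.count p ['"'] = p.count '"' := by
  have := count_go_eq p.length p 0 (le_refl _)
  simpa [PySem.Chars.count] using this

theorem join_eq : ∀ (ps : List (List Char)), PySem.Chars.join [','] ps = joinC ps
  | [] => by simp [PySem.Chars.join, List.intercalate, joinC]
  | [p] => by simp [PySem.Chars.join, List.intercalate, joinC]
  | p :: q :: ps => by
    have h := join_eq (q :: ps)
    simp only [PySem.Chars.join, List.intercalate, List.intersperse_cons₂,
      List.flatten_cons] at h ⊢
    rw [h]
    simp [joinC]

theorem joinC_cons (p : List Char) (ps : List (List Char)) (h : ps ≠ []) :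
    joinC (p :: ps) = p ++ ',' :: joinC ps := by
  cases ps with
  | nil => exact absurd rfl h
  | cons q qs => rfl

theorem mySplitAux_ne_nil (l : List Char) : ∀ cur, mySplitAux l cur ≠ [] := by
  induction l with
  | nil => intro cur; simp [mySplitAux]
  | cons c rest ih =>
    intro cur
    by_cases hc : c = ',' <;> simp [mySplitAux, hc, ih]

theorem mySplitAux_no_comma (l : List Char) : ∀ cur, ',' ∉ cur →
    ∀ p ∈ mySplitAux l cur, ',' ∉ p := by
  induction l with
  | nil =>
    intro cur hcur p hp
    simp [mySplitAux] at hp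
    subst hp
    simpa using hcur
  | cons c rest ih =>
    intro cur hcur p hp
    by_cases hc : c = ','
    · subst hc
      simp [mySplitAux] at hp
      rcases hp with hp | hp
      · subst hp; simpa using hcur
      · exact ih [] (by simp) p hp
    · simp [mySplitAux, hc] at hp
      exact ih (c :: cur) (by simp [hcur]; exact fun h => absurd h.symm hc) p hp

theorem joinC_mySplitAux (l : List Char) : ∀ cur, joinC (mySplitAux l cur) = cur.reverse ++ l := by
  induction l with
  | nil => intro cur; simp [mySplitAux, joinC]
  | cons c rest ih =>
    intro cur
    by_cases hc : c = ','
    · subst hc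
      rw [mySplitAux, if_pos rfl, joinC_cons _ _ (mySplitAux_ne_nil rest []), ih []]
      simp
    · rw [mySplitAux, if_neg hc, ih (c :: cur)]
      simp

theorem joinC_append_singleton (buf : List (List Char)) (p : List Char) (h : buf ≠ []) :
    joinC (buf ++ [p]) = joinC buf ++ ',' :: p := by
  induction buf with
  | nil => exact absurd rfl h
  | cons b bs ih =>
    cases bs with
    | nil => rfl
    | cons q qs =>
      rw [List.cons_append, joinC_cons _ _ (by simp), joinC_cons _ _ (by simp),
        ih (by simp)]
      simp

theorem get_mid (done rest : List Char) (c : Char) (h : done.length < (done ++ c :: rest).length) :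
    (done ++ c :: rest)[done.length] = c := by
  rw [List.getElem_append_right (le_refl _)]
  simp

theorem slice_mid (done rest : List Char) (iBeg : Nat) (h : iBeg ≤ done.length) :
    PySem.List.slice (done ++ rest) (some (iBeg : Int)) (some (done.length : Int))
      = done.drop iBeg := by
  rw [PySem.List.slice_natCast, List.drop_append_of_le_length h,
    List.take_append_of_le_length (by simp), List.take_of_length_le (by simp)]

-- A's loop computes goFields
theorem aWhile_eq (rest : List Char) : ∀ (done : List Char) (lRow : List (List Char)) (q : Bool)
    (iBeg : Nat), iBeg ≤ done.length →
    aWhile (done ++ rest) lRow q iBeg done.length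
      = lRow ++ (goFields rest (done.drop iBeg) q).map unquote_py := by
  induction rest with
  | nil =>
    intro done lRow q iBeg h
    rw [aWhile, dif_neg (by simp), slice_mid done [] iBeg h]
    simp [goFields]
  | cons c rest ih =>
    intro done lRow q iBeg h
    have hlt : done.length < (done ++ c :: rest).length := by simp
    rw [aWhile, dif_pos hlt]
    simp only [get_mid done rest c hlt]
    by_cases hcq : c = ',' ∧ q = false
    · rw [if_pos hcq]
      obtain ⟨hc, hq⟩ := hcq
      subst hc hq
      have hs : (done ++ ',' :: rest) = (done ++ [',']) ++ rest := by simp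
      have hlen : done.length + 1 = (done ++ [',']).length := by simp
      rw [slice_mid done (',' :: rest) iBeg h, hs, hlen,
        ih (done ++ [',']) _ false (done ++ [',']).length (le_refl _)]
      simp [goFields]
    · rw [if_neg hcq]
      have hs : (done ++ c :: rest) = (done ++ [c]) ++ rest := by simp
      have hlen : done.length + 1 = (done ++ [c]).length := by simp
      have hdrop : (done ++ [c]).drop iBeg = done.drop iBeg ++ [c] :=
        List.drop_append_of_le_length h
      have hgo : goFields (c :: rest) (done.drop iBeg) q
          = goFields rest (done.drop iBeg ++ [c]) (if c = '"' then !q else q) := by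
        rw [goFields, if_neg hcq]
      by_cases hc : c = '"'
      · subst hc
        rw [if_pos rfl, hs, hlen, ih (done ++ ['"']) lRow (!q) iBeg (by simp; omega),
          hdrop, hgo]
        simp
      · rw [if_neg hc, hs, hlen, ih (done ++ [c]) lRow q iBeg (by simp; omega),
          hdrop, hgo]
        simp [hc]

def parityQ (p : List Char) : Bool := p.count '"' % 2 = 1

theorem goFields_consume (p : List Char) (hp : ',' ∉ p) :
    ∀ (rest acc : List Char) (q : Bool),
      goFields (p ++ rest) acc q = goFields rest (acc ++ p) (xor q (parityQ p)) := by
  induction p with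
  | nil => intro rest acc q; simp [parityQ]
  | cons c p' ih =>
    intro rest acc q
    have hc : c ≠ ',' := by intro h; exact hp (by simp [h])
    have hp' : ',' ∉ p' := fun h => hp (by simp [h])
    have hnc : ¬ (c = ',' ∧ q = false) := fun h => hc h.1
    rw [List.cons_append, goFields, if_neg hnc, ih hp' rest (acc ++ [c])]
    have hpar : parityQ (c :: p') = xor (decide (c = '"')) (parityQ p') := by
      by_cases hq : c = '"' <;> simp [parityQ, hq]
      rcases Nat.mod_two_eq_zero_or_one (p'.count '"') with h | h <;>
        simp [Nat.add_mod, h]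
    rw [hpar]
    congr 1
    · simp
    · by_cases hq : c = '"' <;> cases q <;> simp [hq]

def startAcc (buf : List (List Char)) : List Char :=
  if buf = [] then [] else joinC buf ++ [',']

def bFinish (st : List (List Char) × List (List Char) × Nat) : List (List Char) :=
  if st.2.1 = [] then st.1 else st.1 ++ [unquote_py (PySem.Chars.join [','] st.2.1)]

theorem bStep_eq (lRow buf : List (List Char)) (nQ : Nat) (p : List Char) :
    bStep (lRow, buf, nQ) p =
      if (nQ + p.count '"') % 2 = 0 then
        (lRow ++ [unquote_py (joinC (buf ++ [p]))], [], nQ + p.count '"')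
      else (lRow, buf ++ [p], nQ + p.count '"') := by
  simp [bStep, count_quote_eq, join_eq]

theorem startAcc_append (buf : List (List Char)) (p : List Char) :
    startAcc buf ++ p = joinC (buf ++ [p]) := by
  by_cases h : buf = []
  · subst h; simp [startAcc, joinC]
  · rw [startAcc, if_neg h, joinC_append_singleton _ _ h]; simp

theorem parity_add (nQ k : Nat) :
    (decide ((nQ + k) % 2 = 1)) = xor (decide (nQ % 2 = 1)) (decide (k % 2 = 1)) := by
  rcases Nat.mod_two_eq_zero_or_one nQ with h | h <;>
    rcases Nat.mod_two_eq_zero_or_one k with h' | h' <;>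
      simp [Nat.add_mod, h, h']

-- B's fold computes goFields too
theorem bFold_eq : ∀ (ps : List (List Char)), (∀ p ∈ ps, ',' ∉ p) → ps ≠ [] →
    ∀ (lRow buf : List (List Char)) (nQ : Nat),
      bFinish (ps.foldl bStep (lRow, buf, nQ))
        = lRow ++ (goFields (joinC ps) (startAcc buf) (decide (nQ % 2 = 1))).map unquote_py := by
  intro ps
  induction ps with
  | nil => intro _ hne; exact absurd rfl hne
  | cons p ps' ih =>
    intro hnc _ lRow buf nQ
    have hp : ',' ∉ p := hnc p (by simp)
    cases ps' with
    | nil =>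
      -- single piece: both parities yield the same closed field
      rw [List.foldl_cons, List.foldl_nil, bStep_eq]
      have hjoin : joinC [p] = p := rfl
      rw [hjoin]
      conv_rhs => rw [← List.append_nil p]
      rw [goFields_consume p hp [] (startAcc buf), goFields, startAcc_append]
      by_cases h : (nQ + p.count '"') % 2 = 0
      · rw [if_pos h]
        simp [bFinish]
      · rw [if_neg h]
        simp [bFinish, join_eq]
    | cons q' qs' =>
      have hne' : q' :: qs' ≠ [] := by simp
      have hnc' : ∀ r ∈ q' :: qs', ',' ∉ r := fun r hr => hnc r (by simp [hr])
      rw [List.foldl_cons, bStep_eq,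
        joinC_cons p (q' :: qs') hne',
        goFields_consume p hp (',' :: joinC (q' :: qs')) (startAcc buf)]
      have hq1 : xor (decide (nQ % 2 = 1)) (parityQ p)
          = decide ((nQ + p.count '"') % 2 = 1) := by
        rw [parity_add]; rfl
      rw [hq1]
      by_cases h : (nQ + p.count '"') % 2 = 0
      · have hq0 : decide ((nQ + p.count '"') % 2 = 1) = false := by
          simp; omega
        rw [if_pos h, hq0, goFields, if_pos ⟨rfl, rfl⟩,
          ih hnc' hne' _ [] (nQ + p.count '"')]
        rw [hq0, startAcc_append]
        simp [startAcc]
      · have hq0 : decide ((nQ + p.count '"') % 2 = 1) = true := by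
          simp; omega
        rw [if_neg h, hq0, goFields, if_neg (by simp)]
        have hccm : (',' : Char) ≠ '"' := by decide
        rw [if_neg hccm, ih hnc' hne' lRow (buf ++ [p]) (nQ + p.count '"'), hq0]
        have hsa : startAcc buf ++ p ++ [','] = startAcc (buf ++ [p]) := by
          rw [startAcc_append, startAcc, if_neg (by simp)]
        rw [hsa]

theorem bRow_eq_aWhile (s : List Char) : bRow s = aWhile s [] false 0 0 := by
  have h1 : bRow s = bFinish ((PySem.Chars.splitOn s [',']).foldl bStep ([], [], 0)) := by
    simp [bRow, bFinish]
  rw [h1, splitOn_eq s,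
    bFold_eq (mySplitAux s []) (mySplitAux_no_comma s [] (by simp)) (mySplitAux_ne_nil s []) [] [] 0,
    joinC_mySplitAux s []]
  have h2 := aWhile_eq s [] [] false 0 (by simp)
  simp only [List.nil_append, List.drop_nil, List.length_nil] at h2
  rw [h2]
  simp [startAcc]

-- the catalog filter commutes with mapping rows to strings
theorem cond_map (lRow : List (List Char)) :
    (decide (1 < (lRow.map String.ofList).length ∧
      0 < PySem.Str.len (PySem.List.pyGetD (lRow.map String.ofList) 0 "") ∧
      (PySem.List.pyGetD (lRow.map String.ofList) 1 "" = "Catalog" ∨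
       PySem.List.pyGetD (lRow.map String.ofList) 1 "" = "SourceSet")))
    = decide (1 < lRow.length ∧ 0 < (PySem.List.pyGetD lRow 0 []).length ∧
      (PySem.List.pyGetD lRow 1 [] = "Catalog".toList ∨
       PySem.List.pyGetD lRow 1 [] = "SourceSet".toList)) := by
  rw [decide_eq_decide]
  match lRow with
  | [] => simp
  | [a] => simp
  | a :: b :: t =>
    have hofL : ∀ (v : List Char) (w : String), String.ofList v = w ↔ v = w.toList := by
      intro v w
      constructor
      · intro h; have := congrArg String.toList h; simpa using this
      · intro h; subst h; exact String.ofList_toList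
    simp [pysem, PySem.Str.len, hofL]

-- ===== VERDICT (by name: the statement is the Claim_ definition above) =====
theorem parseCatRows_py_spec : Claim_equal_parseCatRows_py := by
  intro lRows hD
  clear hD
  unfold Spec_parseCatRows_py parseCatRows_py parseCatRows_py_alt
  simp only [bRow_eq_aWhile]
  suffices h : ∀ acc : List (List String),
      lRows.foldl (fun llOut sRow =>
        if 1 < (aWhile sRow.toList [] false 0 0).length ∧
            0 < (PySem.List.pyGetD (aWhile sRow.toList [] false 0 0) 0 []).length ∧
            (PySem.List.pyGetD (aWhile sRow.toList [] false 0 0) 1 [] = "Catalog".toList ∨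
             PySem.List.pyGetD (aWhile sRow.toList [] false 0 0) 1 [] = "SourceSet".toList) then
          llOut ++ [(aWhile sRow.toList [] false 0 0).map String.ofList]
        else llOut) acc
      = acc ++ ((lRows.map (fun sRow => (aWhile sRow.toList [] false 0 0).map String.ofList)).filter
          (fun lRow =>
            decide (1 < lRow.length ∧ 0 < (PySem.Str.len (PySem.List.pyGetD lRow 0 "")) ∧
              (PySem.List.pyGetD lRow 1 "" = "Catalog" ∨
               PySem.List.pyGetD lRow 1 "" = "SourceSet")))) by
    simpa using h []
  induction lRows with
  | nil => intro acc; simp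
  | cons r rs ih =>
    intro acc
    rw [List.foldl_cons, ih, List.map_cons, List.filter_cons, cond_map]
    by_cases hc : 1 < (aWhile r.toList [] false 0 0).length ∧
        0 < (PySem.List.pyGetD (aWhile r.toList [] false 0 0) 0 []).length ∧
        (PySem.List.pyGetD (aWhile r.toList [] false 0 0) 1 [] = "Catalog".toList ∨
         PySem.List.pyGetD (aWhile r.toList [] false 0 0) 1 [] = "SourceSet".toList)
    · rw [if_pos hc, if_pos (decide_eq_true hc)]
      simp
    · rw [if_neg hc, if_neg (by simpa using hc)]
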